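-- pv_equiv track=rewrite | github.com/by-gramm/TIL | algorithm/problem solving reviews/220915-220921/2022KAKAO_INTERNSHIP_행렬과 연산.py | solution
-- ===== SOURCE A (Python) =====
-- from collections import deque
--
-- def shift_row(rc):
--     arr = rc.pop()
--     rc.appendleft(arr)
--
-- def rotate(rc, R, C):
--     rc[R].append(rc[R - 1][C])
--
--     for r in range(R - 1, 0, -1):
--         rc[r][C] = rc[r - 1][C]
--
--     rc[0].appendleft(rc[1][0])
--
--     for r in range(1, R):
--         rc[r][0] = rc[r + 1][0]
--
--     rc[0].pop()
--     rc[R].popleft()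
--
-- def solution(rc, operations):
--     R = len(rc) - 1
--     C = len(rc[0]) - 1
--
--     rc = deque([deque(arr) for arr in rc])
--
--     for operation in operations:
--         if operation[0] == "S":
--             shift_row(rc)
--         else:
--             rotate(rc, R, C)
--
--     return [list(arr) for arr in rc]
-- ===== SOURCE B (Python) =====
-- def _source(rows, r, c, R, C):
--     # value that moves into cell (r, c) under one clockwise border rotation
--     if r == 0:
--         return rows[r][c - 1] if c > 0 else rows[r + 1][c]
--     if r == R:
--         return rows[r][c + 1] if c < C else rows[r - 1][c]
--     if c == C:
--         return rows[r - 1][c]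
--     if c == 0:
--         return rows[r + 1][c]
--     return rows[r][c]
--
-- def solution(rc, operations):
--     rows = [list(row) for row in rc]
--     for op in operations:
--         if op[0] == "S":
--             rows = rows[-1:] + rows[:-1]
--         else:
--             R, C = len(rows) - 1, len(rows[0]) - 1
--             rows = [[_source(rows, r, c, R, C) for c in range(C + 1)]
--                     for r in range(R + 1)]
--     return rows
-- ===== Notes on version B (the rewrite author's own statement) =====
-- stated objective: simpler
-- what changed: B drops A's in-place deque surgery (append/pop plus two in-place column-shift loops over a deque of deques) and instead rebuilds the matrix purely: ShiftRow is a slice rotation rows[-1:] + rows[:-1], and the frame rotation constructs every cell from a clockwise-predecessor formula in one comprehension.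
-- outside the precondition, e.g. on solution([[1], [2], [3]], ['Rotate']): A returns [[1], [3], [2]], B returns [[2], [1], [2]]; on solution([[1, 2], [3, 4, 5]], ['Rotate']): A returns [[3, 1], [4, 5, 2]], B returns [[3, 1], [4, 2]]
import Mathlib
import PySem

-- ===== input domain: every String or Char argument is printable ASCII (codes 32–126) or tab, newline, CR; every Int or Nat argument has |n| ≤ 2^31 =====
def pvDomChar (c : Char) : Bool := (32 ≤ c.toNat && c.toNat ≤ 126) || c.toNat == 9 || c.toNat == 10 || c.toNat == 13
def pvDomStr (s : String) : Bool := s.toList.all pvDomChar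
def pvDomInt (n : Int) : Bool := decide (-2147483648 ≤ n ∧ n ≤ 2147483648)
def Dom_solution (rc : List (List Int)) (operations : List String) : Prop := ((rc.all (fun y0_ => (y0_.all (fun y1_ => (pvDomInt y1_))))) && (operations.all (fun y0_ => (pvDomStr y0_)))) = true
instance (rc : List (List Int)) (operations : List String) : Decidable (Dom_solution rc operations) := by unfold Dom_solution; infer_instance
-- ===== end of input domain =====

-- B replaces A's in-place deque surgery (appends/pops plus two in-place column-shift loops)
-- by a pure rebuild: a slice rotation for ShiftRow and a per-cell clockwise-predecessor
-- formula for the frame rotation (objective: simpler; return value only — A mutates nothing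
-- the caller sees, it copies its argument into deques first).

-- ===== PORT A =====
-- The deque-of-deques state is ported as List (List Int); gA/setA are the rc[r][c]
-- reads/writes (all reads/writes are in range under Pre_, so getD's default is never read there).
def gA (m : List (List Int)) (r c : Nat) : Int := (m.getD r []).getD c 0

def setA (m : List (List Int)) (r c : Nat) (v : Int) : List (List Int) :=
  m.modify r (fun row => row.set c v)

-- arr = rc.pop(); rc.appendleft(arr)   (pop of an empty deque raises: excluded by Pre_)
def pyShiftRow (m : List (List Int)) : List (List Int) :=
  match m.getLast? with
  | some arr => arr :: m.dropLast
  | none => m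

-- for r in range(R-1, 0, -1): rc[r][C] = rc[r-1][C]   (invoked as rotLoop1 C m (R-1))
def rotLoop1 (C : Nat) : List (List Int) → Nat → List (List Int)
  | m, 0 => m
  | m, r+1 => rotLoop1 C (setA m (r+1) C (gA m r C)) r

-- for r in range(1, R): rc[r][0] = rc[r+1][0]   (invoked as rotLoop2 m 1 (R-1))
def rotLoop2 : List (List Int) → Nat → Nat → List (List Int)
  | m, _, 0 => m
  | m, i, n+1 => rotLoop2 (setA m i 0 (gA m (i+1) 0)) (i+1) n

def pyRotate (m : List (List Int)) (R C : Nat) : List (List Int) :=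
  let m1 := m.modify R (fun row => row ++ [gA m (R-1) C])   -- rc[R].append(rc[R-1][C])
  let m2 := rotLoop1 C m1 (R-1)
  let m3 := m2.modify 0 (fun row => gA m2 1 0 :: row)       -- rc[0].appendleft(rc[1][0])
  let m4 := rotLoop2 m3 1 (R-1)
  let m5 := m4.modify 0 (fun row => row.dropLast)           -- rc[0].pop()
  m5.modify R (fun row => row.drop 1)                       -- rc[R].popleft()

def solution (rc : List (List Int)) (operations : List String) : List (List Int) :=
  let R := rc.length - 1
  let C := (rc.headD []).length - 1   -- len(rc[0]) - 1; rc ≠ [] under Pre_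
  -- rc = deque(deque(arr) for arr in rc) is the identity on immutable lists
  operations.foldl
    (fun m op => if PySem.Str.pyGet? op 0 = some 'S' then pyShiftRow m else pyRotate m R C) rc

-- ===== PORT B =====
-- _source: the value that moves into cell (r, c) under one clockwise border rotation
-- (rows[r][c] is pyGetD (pyGetD rows r []) c 0; every read is in range under Pre_)
def srcB (rows : List (List Int)) (r c R C : Int) : Int :=
  if r = 0 then (if 0 < c then PySem.List.pyGetD (PySem.List.pyGetD rows r []) (c-1) 0
                 else PySem.List.pyGetD (PySem.List.pyGetD rows (r+1) []) c 0)
  else if r = R then (if c < C then PySem.List.pyGetD (PySem.List.pyGetD rows r []) (c+1) 0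
                      else PySem.List.pyGetD (PySem.List.pyGetD rows (r-1) []) c 0)
  else if c = C then PySem.List.pyGetD (PySem.List.pyGetD rows (r-1) []) c 0
  else if c = 0 then PySem.List.pyGetD (PySem.List.pyGetD rows (r+1) []) c 0
  else PySem.List.pyGetD (PySem.List.pyGetD rows r []) c 0

-- [[_source(rows, r, c, R, C) for c in range(C+1)] for r in range(R+1)]
def rotB (rows : List (List Int)) (R C : Int) : List (List Int) :=
  (PySem.List.pyRange 0 (R+1) 1).map
    (fun r => (PySem.List.pyRange 0 (C+1) 1).map (fun c => srcB rows r c R C))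

-- rows[-1:] + rows[:-1]
def shiftB (rows : List (List Int)) : List (List Int) :=
  PySem.List.slice rows (some (-1)) none ++ PySem.List.slice rows none (some (-1))

def solution_alt (rc : List (List Int)) (operations : List String) : List (List Int) :=
  -- rows = [list(row) for row in rc]: the copy is the identity on immutable lists
  operations.foldl
    (fun rows op =>
      if PySem.Str.pyGet? op 0 = some 'S' then shiftB rows
      else rotB rows ((rows.length : Int) - 1) (((rows.headD []).length : Int) - 1))
    (rc.map (fun row => row))

-- ===== PRECONDITION & SPEC =====
-- Pre_ excludes inputs on which A raises (empty matrix, empty operation string, a rotate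
-- operation on a one-row or on most ragged matrices) and, when a rotate operation occurs,
-- the one-column or ragged matrices on which A returns an accidental value produced by its
-- shift loops reading already-overwritten cells.
def Pre_solution (rc : List (List Int)) (operations : List String) : Prop :=
  rc ≠ [] ∧ (∀ op ∈ operations, op ≠ "") ∧
    ((∃ op ∈ operations, ¬ PySem.Str.pyGet? op 0 = some 'S') →
      2 ≤ rc.length ∧ 2 ≤ (rc.headD []).length ∧ ∀ row ∈ rc, row.length = (rc.headD []).length)

instance (rc : List (List Int)) (operations : List String) : Decidable (Pre_solution rc operations) := by
  unfold Pre_solution; infer_instance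

def pvWitness_solution : List (List Int) × List String := ([[1, 2], [3, 4]], ["ShiftRow", "Rotate"])

def Spec_solution (rc : List (List Int)) (operations : List String) (out : List (List Int)) : Prop :=
  out = solution_alt rc operations

instance (rc : List (List Int)) (operations : List String) (out : List (List Int)) : Decidable (Spec_solution rc operations out) := by
  unfold Spec_solution; infer_instance

-- ===== CLAIM =====
def Claim_equal_solution : Prop :=
  ∀ (rc : List (List Int)) (operations : List String), Dom_solution rc operations →
    Pre_solution rc operations → Spec_solution rc operations (solution rc operations)

-- ===== LEMMAS AND PROOFS =====
-- Nat-indexed restatements of B's rotation, used only by the proofs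
def srcN (rows : List (List Int)) (r c R C : Nat) : Int :=
  if r = 0 then (if 0 < c then (rows.getD r []).getD (c-1) 0 else (rows.getD (r+1) []).getD c 0)
  else if r = R then (if c < C then (rows.getD r []).getD (c+1) 0 else (rows.getD (r-1) []).getD c 0)
  else if c = C then (rows.getD (r-1) []).getD c 0
  else if c = 0 then (rows.getD (r+1) []).getD c 0
  else (rows.getD r []).getD c 0

def rotN (rows : List (List Int)) (R C : Nat) : List (List Int) :=
  (List.range (R+1)).map (fun r => (List.range (C+1)).map (fun c => srcN rows r c R C))

theorem srcB_cast (m : List (List Int)) (r c R C : Nat) :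
    srcB m r c R C = srcN m r c R C := by
  simp only [srcB, srcN]
  by_cases h1 : r = 0
  · rw [if_pos (by omega : (r:Int) = 0), if_pos h1]
    by_cases h2 : 0 < c
    · rw [if_pos (by omega : (0:Int) < (c:Int)), if_pos h2,
        show ((c:Int) - 1) = ((c - 1 : Nat) : Int) by omega]
      simp only [PySem.List.pyGetD_natCast]
    · rw [if_neg (by omega : ¬ (0:Int) < (c:Int)), if_neg h2,
        show ((r:Int) + 1) = ((r + 1 : Nat) : Int) by omega]
      simp only [PySem.List.pyGetD_natCast]
  · rw [if_neg (by omega : ¬ (r:Int) = 0), if_neg h1]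
    by_cases h3 : r = R
    · rw [if_pos (by exact_mod_cast h3 : (r:Int) = (R:Int)), if_pos h3]
      by_cases h4 : c < C
      · rw [if_pos (by exact_mod_cast h4 : (c:Int) < (C:Int)), if_pos h4,
          show ((c:Int) + 1) = ((c + 1 : Nat) : Int) by omega]
        simp only [PySem.List.pyGetD_natCast]
      · rw [if_neg (by omega : ¬ (c:Int) < (C:Int)), if_neg h4,
          show ((r:Int) - 1) = ((r - 1 : Nat) : Int) by omega]
        simp only [PySem.List.pyGetD_natCast]
    · rw [if_neg (by omega : ¬ (r:Int) = (R:Int)), if_neg h3]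
      by_cases h5 : c = C
      · rw [if_pos (by exact_mod_cast h5 : (c:Int) = (C:Int)), if_pos h5,
          show ((r:Int) - 1) = ((r - 1 : Nat) : Int) by omega]
        simp only [PySem.List.pyGetD_natCast]
      · rw [if_neg (by omega : ¬ (c:Int) = (C:Int)), if_neg h5]
        by_cases h6 : c = 0
        · rw [if_pos (by omega : (c:Int) = 0), if_pos h6,
            show ((r:Int) + 1) = ((r + 1 : Nat) : Int) by omega]
          simp only [PySem.List.pyGetD_natCast]
        · rw [if_neg (by omega : ¬ (c:Int) = 0), if_neg h6]
          simp only [PySem.List.pyGetD_natCast]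

theorem rotB_cast (m : List (List Int)) (R C : Nat) :
    rotB m (R:Int) (C:Int) = rotN m R C := by
  rw [rotB, rotN, show ((R:Int) + 1) = ((R + 1 : Nat) : Int) by omega,
    show ((C:Int) + 1) = ((C + 1 : Nat) : Int) by omega,
    PySem.List.pyRange_zero_natCast, PySem.List.pyRange_zero_natCast,
    List.map_map]
  refine List.map_congr_left fun r _ => ?_
  rw [Function.comp_apply, List.map_map]
  exact List.map_congr_left fun c _ => srcB_cast m r c R C

theorem setA_getElem? (m : List (List Int)) (r c : Nat) (v : Int) (j : Nat) :
    (setA m r c v)[j]? = if r = j then (m[j]?).map (fun row => row.set c v) else m[j]? := by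
  by_cases h : r = j <;> cases hm : m[j]? <;> simp [setA, hm, h]

theorem gA_setA_ne (m : List (List Int)) (r c : Nat) (v : Int) (r' c' : Nat) (h : r ≠ r') :
    gA (setA m r c v) r' c' = gA m r' c' := by
  simp [gA, List.getD_eq_getElem?_getD, setA_getElem? m r c v r', h]

theorem rotLoop1_getElem? (C : Nat) : ∀ (k : Nat) (m : List (List Int)) (j : Nat),
    (rotLoop1 C m k)[j]? =
      if 1 ≤ j ∧ j ≤ k then (m[j]?).map (fun row => row.set C (gA m (j-1) C)) else m[j]? := by
  intro k
  induction k with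
  | zero => intro m j; rw [rotLoop1]; exact (if_neg (by omega)).symm
  | succ k ih =>
    intro m j
    rw [rotLoop1, ih]
    by_cases h1 : 1 ≤ j ∧ j ≤ k
    · rw [if_pos h1, if_pos (by omega), setA_getElem?, if_neg (by omega),
        gA_setA_ne _ _ _ _ _ _ (by omega)]
    · by_cases h2 : j = k + 1
      · subst h2
        rw [if_neg h1, if_pos (by omega), setA_getElem?, if_pos rfl]; simp
      · rw [if_neg h1, if_neg (by omega), setA_getElem?, if_neg (by omega)]

theorem rotLoop2_getElem? : ∀ (n : Nat) (i : Nat) (m : List (List Int)) (j : Nat),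
    (rotLoop2 m i n)[j]? =
      if i ≤ j ∧ j < i + n then (m[j]?).map (fun row => row.set 0 (gA m (j+1) 0)) else m[j]? := by
  intro n
  induction n with
  | zero => intro i m j; rw [rotLoop2]; exact (if_neg (by omega)).symm
  | succ n ih =>
    intro i m j
    rw [rotLoop2, ih]
    by_cases h1 : i + 1 ≤ j ∧ j < i + 1 + n
    · rw [if_pos h1, if_pos (by omega), setA_getElem?, if_neg (by omega),
        gA_setA_ne _ _ _ _ _ _ (by omega)]
    · by_cases h2 : j = i
      · subst h2
        rw [if_neg h1, if_pos (by omega), setA_getElem?, if_pos rfl]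
      · rw [if_neg h1, if_neg (by omega), setA_getElem?, if_neg (by omega)]

theorem rotate_eq (m : List (List Int)) (R C : Nat) (hR : 1 ≤ R) (hC : 1 ≤ C)
    (hlen : m.length = R + 1) (hrow : ∀ row ∈ m, row.length = C + 1) :
    pyRotate m R C = rotN m R C := by
  -- convenience reshaping of List.getElem?_modify (if pulled out of the map)
  have hmod : ∀ (l : List (List Int)) (i : Nat) (f : List Int → List Int) (j : Nat),
      (l.modify i f)[j]? = if i = j then (l[j]?).map f else l[j]? := by
    intro l i f j
    by_cases h : i = j <;> cases hm : l[j]? <;> simp [hm, h]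
  have hmj : ∀ j, j ≤ R → m[j]? = some (m.getD j []) ∧ (m.getD j []).length = C + 1 := by
    intro j hj
    have hj' : j < m.length := by omega
    rw [List.getD_eq_getElem?_getD, List.getElem?_eq_getElem hj']
    exact ⟨rfl, hrow _ (List.getElem_mem hj')⟩
  have hgm : ∀ j c, j ≤ R → c ≤ C → (m.getD j [])[c]? = some (gA m j c) := by
    intro j c hj hc
    obtain ⟨_, hl⟩ := hmj j hj
    have hc' : c < (m.getD j []).length := by omega
    simp only [gA, List.getD_eq_getElem?_getD (l := m.getD j []),
      List.getElem?_eq_getElem hc', Option.getD_some]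
  set v0 := gA m (R-1) C with hv0
  set m1 := m.modify R (fun row => row ++ [v0]) with hm1def
  set m2 := rotLoop1 C m1 (R-1) with hm2def
  set v1 := gA m2 1 0 with hv1def
  set m3 := m2.modify 0 (fun row => v1 :: row) with hm3def
  set m4 := rotLoop2 m3 1 (R-1) with hm4def
  set m5 := m4.modify 0 (fun row => row.dropLast) with hm5def
  have hpy : pyRotate m R C = m5.modify R (fun row => row.drop 1) := rfl
  have h1 : ∀ j, m1[j]? = if R = j then (m[j]?).map (fun row => row ++ [v0]) else m[j]? :=
    fun j => hmod m R _ j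
  have h2 : ∀ j, m2[j]? = if 1 ≤ j ∧ j ≤ R - 1 then
      (m1[j]?).map (fun row => row.set C (gA m1 (j-1) C)) else m1[j]? :=
    fun j => rotLoop1_getElem? C (R-1) m1 j
  have h3 : ∀ j, m3[j]? = if 0 = j then (m2[j]?).map (fun row => v1 :: row) else m2[j]? :=
    fun j => hmod m2 0 _ j
  have h4 : ∀ j, m4[j]? = if 1 ≤ j ∧ j < R then
      (m3[j]?).map (fun row => row.set 0 (gA m3 (j+1) 0)) else m3[j]? := by
    intro j
    have e : 1 + (R - 1) = R := by omega
    rw [hm4def, rotLoop2_getElem?, e]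
  have h5 : ∀ j, m5[j]? = if 0 = j then (m4[j]?).map (fun row => row.dropLast) else m4[j]? :=
    fun j => hmod m4 0 _ j
  have hm1u : ∀ j, j ≠ R → m1[j]? = m[j]? := fun j h => by rw [h1, if_neg (fun e => h e.symm)]
  have hm2R : m2[R]? = m1[R]? := by rw [h2, if_neg (by omega)]
  have hm20 : m2[0]? = m1[0]? := by rw [h2, if_neg (by omega)]
  have hgA1 : ∀ r c, r ≠ R → gA m1 r c = gA m r c := by
    intro r c h
    simp only [gA, List.getD_eq_getElem?_getD, hm1u r h]
  have hv1 : v1 = gA m 1 0 := by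
    rw [hv1def]
    simp only [gA, List.getD_eq_getElem?_getD]
    by_cases h2R : 2 ≤ R
    · rw [h2 1, if_pos (by omega), hm1u 1 (by omega)]
      obtain ⟨he, hl⟩ := hmj 1 (by omega)
      rw [he]
      simp only [Option.map_some, Option.getD_some]
      rw [List.getElem?_set, if_neg (by omega)]
    · have hR1 : R = 1 := by omega
      rw [h2 1, if_neg (by omega), h1 1, if_pos hR1]
      obtain ⟨he, hl⟩ := hmj 1 (by omega)
      rw [he]
      simp only [Option.map_some, Option.getD_some]
      rw [List.getElem?_append_left (by omega)]
  have hv2 : ∀ j, 1 ≤ j → j < R → gA m3 (j+1) 0 = gA m (j+1) 0 := by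
    intro j hj1 hjR
    simp only [gA, List.getD_eq_getElem?_getD]
    rw [h3 (j+1), if_neg (by omega)]
    by_cases hc : j + 1 ≤ R - 1
    · rw [h2 (j+1), if_pos (by omega), hm1u (j+1) (by omega)]
      obtain ⟨he, hl⟩ := hmj (j+1) (by omega)
      rw [he]
      simp only [Option.map_some, Option.getD_some]
      rw [List.getElem?_set, if_neg (by omega)]
    · have hjR' : R = j + 1 := by omega
      rw [h2 (j+1), if_neg (by omega), h1 (j+1), if_pos hjR']
      obtain ⟨he, hl⟩ := hmj (j+1) (by omega)
      rw [he]
      simp only [Option.map_some, Option.getD_some]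
      rw [List.getElem?_append_left (by omega)]
  rw [hpy]
  apply List.ext_getElem?
  intro j
  rw [hmod m5 R _ j]
  have hrB : (rotN m R C)[j]? =
      if j ≤ R then some ((List.range (C+1)).map (fun c => srcN m j c R C)) else none := by
    by_cases hj : j ≤ R
    · rw [if_pos hj, rotN, List.getElem?_map, List.getElem?_range (by omega), Option.map_some]
    · rw [if_neg hj, rotN, List.getElem?_map, List.getElem?_eq_none (by simp; omega), Option.map_none]
  rw [hrB]
  by_cases hj0 : j = 0
  · subst hj0
    rw [if_neg (by omega), if_pos (by omega)]
    rw [h5 0, if_pos rfl, h4 0, if_neg (by omega), h3 0, if_pos rfl, hm20, hm1u 0 (by omega)]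
    obtain ⟨he, hl⟩ := hmj 0 (by omega)
    rw [he]
    simp only [Option.map_some]
    congr 1
    rw [List.dropLast_cons_of_ne_nil (by intro hnil; rw [hnil] at hl; simp at hl), hv1]
    apply List.ext_getElem?
    intro c
    cases c with
    | zero =>
      rw [List.getElem?_map, List.getElem?_range (by omega), Option.map_some]
      simp [srcN, gA]
    | succ c =>
      rw [List.getElem?_cons_succ, List.getElem?_dropLast]
      by_cases hc : c < C
      · rw [if_pos (by omega), List.getElem?_map, List.getElem?_range (by omega), Option.map_some,
          hgm 0 c (by omega) (by omega)]
        simp [srcN, gA]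
      · rw [if_neg (by omega), List.getElem?_map, List.getElem?_eq_none (by simp; omega), Option.map_none]
  · by_cases hjR : j = R
    · rw [hjR]
      rw [if_pos rfl, if_pos le_rfl]
      rw [h5 R, if_neg (by omega), h4 R, if_neg (by omega), h3 R, if_neg (by omega),
        hm2R, h1 R, if_pos rfl]
      obtain ⟨he, hl⟩ := hmj R le_rfl
      rw [he]
      simp only [Option.map_some]
      congr 1
      apply List.ext_getElem?
      intro c
      rw [List.getElem?_drop]
      by_cases hc1 : c < C
      · rw [List.getElem?_append_left (by omega), List.getElem?_map,
          List.getElem?_range (by omega), Option.map_some,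
          show 1 + c = c + 1 by omega, hgm R (c+1) le_rfl (by omega)]
        simp [srcN, gA, hc1]
        exact fun h => absurd h (by omega)
      · by_cases hc2 : c = C
        · rw [hc2]
          rw [List.getElem?_append_right (by omega),
            show 1 + C - (m.getD R []).length = 0 by omega,
            List.getElem?_map, List.getElem?_range (by omega), Option.map_some]
          simp [srcN, gA, hv0]
          exact fun h => absurd h (by omega)
        · rw [List.getElem?_eq_none (by
              rw [List.length_append, hl]; simp; omega),
            List.getElem?_map, List.getElem?_eq_none (by simp; omega), Option.map_none]
    · by_cases hjle : j ≤ R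
      · rw [if_neg (fun e => hjR e.symm), if_pos hjle]
        rw [h5 j, if_neg (fun e => hj0 e.symm), h4 j, if_pos (by omega), h3 j,
          if_neg (fun e => hj0 e.symm), h2 j, if_pos (by omega), hm1u j (by omega)]
        obtain ⟨he, hl⟩ := hmj j hjle
        rw [he]
        simp only [Option.map_some]
        rw [hv2 j (by omega) (by omega), hgA1 (j-1) C (by omega)]
        congr 1
        apply List.ext_getElem?
        intro c
        rw [List.getElem?_set, List.getElem?_set]
        by_cases hcz : c = 0
        · subst hcz
          rw [if_pos rfl, if_pos (by
              rw [List.length_set, hl]; omega), List.getElem?_map,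
            List.getElem?_range (by omega), Option.map_some]
          simp [srcN, gA, (by omega : ¬ j = 0), (by omega : ¬ j = R)]
          exact fun h => absurd h (by omega)
        · rw [if_neg (fun e => hcz e.symm)]
          by_cases hcC : c = C
          · subst hcC
            rw [if_pos rfl, if_pos (by omega), List.getElem?_map,
              List.getElem?_range (by omega), Option.map_some]
            simp [srcN, gA, (by omega : ¬ j = 0), (by omega : ¬ j = R)]
          · by_cases hcle : c < C
            · rw [if_neg (fun e => hcC e.symm), List.getElem?_map,
                List.getElem?_range (by omega), Option.map_some, hgm j c (by omega) (by omega)]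
              simp [srcN, gA, hcz, hcC, (by omega : ¬ j = 0), (by omega : ¬ j = R)]
            · rw [if_neg (fun e => hcC e.symm), List.getElem?_eq_none (by omega),
                List.getElem?_map, List.getElem?_eq_none (by simp; omega), Option.map_none]
      · rw [if_neg (fun e => hjR e.symm), if_neg hjle]
        rw [h5 j, if_neg (by omega), h4 j, if_neg (by omega), h3 j, if_neg (by omega),
          h2 j, if_neg (by omega), h1 j, if_neg (by omega), List.getElem?_eq_none (by omega)]

theorem shift_eq (m : List (List Int)) (h : m ≠ []) : pyShiftRow m = shiftB m := by
  rw [shiftB, PySem.List.slice_from_neg_one, PySem.List.slice_to_neg_one,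
    List.drop_length_sub_one h]
  simp [pyShiftRow, List.getLast?_eq_some_getLast h]

theorem shiftB_length (m : List (List Int)) (h : m ≠ []) : (shiftB m).length = m.length := by
  have := List.length_pos_of_ne_nil h
  simp [shiftB, PySem.List.slice_from_neg_one, PySem.List.slice_to_neg_one]

theorem shiftB_mem {m : List (List Int)} {row : List Int} (h : row ∈ shiftB m) : row ∈ m := by
  rw [shiftB, PySem.List.slice_from_neg_one, PySem.List.slice_to_neg_one, List.mem_append] at h
  rcases h with h | h
  · exact List.drop_subset _ m h
  · exact List.dropLast_subset m h

theorem rotN_length (m : List (List Int)) (R C : Nat) : (rotN m R C).length = R + 1 := by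
  simp [rotN]

theorem rotN_mem {m : List (List Int)} {R C : Nat} {row : List Int} (h : row ∈ rotN m R C) :
    row.length = C + 1 := by
  rw [rotN, List.mem_map] at h
  obtain ⟨r, _, hr⟩ := h
  simp [← hr]

theorem fold_eq (R C : Nat) : ∀ (ops : List String) (m : List (List Int)), m ≠ [] →
    ((∃ op ∈ ops, ¬ PySem.Str.pyGet? op 0 = some 'S') →
      1 ≤ R ∧ 1 ≤ C ∧ m.length = R + 1 ∧ (∀ row ∈ m, row.length = C + 1)) →
    ops.foldl (fun m op => if PySem.Str.pyGet? op 0 = some 'S' then pyShiftRow m else pyRotate m R C) m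
      = ops.foldl (fun rows op =>
          if PySem.Str.pyGet? op 0 = some 'S' then shiftB rows
          else rotB rows ((rows.length : Int) - 1) (((rows.headD []).length : Int) - 1)) m := by
  intro ops
  induction ops with
  | nil => intro m _ _; rfl
  | cons op ops ih =>
    intro m hne hinv
    simp only [List.foldl_cons]
    by_cases hs : PySem.Str.pyGet? op 0 = some 'S'
    · rw [if_pos hs, if_pos hs, shift_eq m hne]
      refine ih (shiftB m) (List.ne_nil_of_length_pos (by
        rw [shiftB_length m hne]; exact List.length_pos_of_ne_nil hne)) ?_
      intro hex
      obtain ⟨op', hop', hop''⟩ := hex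
      obtain ⟨hR, hC, hlen, hrows⟩ := hinv ⟨op', List.mem_cons_of_mem _ hop', hop''⟩
      exact ⟨hR, hC, by rw [shiftB_length m hne]; exact hlen,
        fun row hrow => hrows row (shiftB_mem hrow)⟩
    · rw [if_neg hs, if_neg hs]
      obtain ⟨hR, hC, hlen, hrows⟩ := hinv ⟨op, List.mem_cons_self, hs⟩
      have hhead : (m.headD []).length = C + 1 := by
        refine hrows _ ?_
        cases m with
        | nil => exact absurd rfl hne
        | cons a t => simp
      have e1 : ((m.length : Int) - 1) = ((R : Nat) : Int) := by omega
      have e2 : (((m.headD []).length : Int) - 1) = ((C : Nat) : Int) := by omega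
      rw [e1, e2, rotB_cast, rotate_eq m R C hR hC hlen hrows]
      refine ih (rotN m R C) (List.ne_nil_of_length_pos (by rw [rotN_length]; omega)) ?_
      intro _
      exact ⟨hR, hC, rotN_length m R C, fun row hrow => rotN_mem hrow⟩

-- ===== VERDICT =====
theorem solution_spec : Claim_equal_solution := by
  intro rc ops _hdom hpre
  obtain ⟨hne, _hops, hrect⟩ := hpre
  unfold Spec_solution solution solution_alt
  rw [List.map_id']
  exact fold_eq (rc.length - 1) ((rc.headD []).length - 1) ops rc hne (by
    intro hex
    obtain ⟨h2, h2c, hr⟩ := hrect hex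
    refine ⟨by omega, by omega, by omega, ?_⟩
    intro row hrow
    have := hr row hrow
    omega)
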